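-- pv_equiv track=rewrite | github.com/mackoo13/popsicle | lore/proc_utils.py | malloc
-- ===== SOURCE A (Python) =====
-- def malloc(name, dtype, sizes, dim):
--     """
--     Generates C code for array memory allocation and random initialization.
--     For multidimensional arrays, the function is called recursively for each dimension.
--     A constant of 2 is added to the size for safety.
--
--     Example 1:
--         malloc('A', 'int', ['N+42'], 0)
--         ->
--         A = malloc((N+42+2)*sizeof(int));
--         for(int i_0=0; i_0<N+42+2; ++i_0) {
--             A[i_0] = (int)rand();
--         }
--
--     Example 2:
--         malloc('A', 'int', ['M', 'N'], 0)
--         ->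
--         A = malloc((M+2)*sizeof(*int))
--         for(int i_0=0; i_0<M+2; ++i_0) {
--             A[i_0] = malloc((N+2)*sizeof(int))
--             for(int i_0=0; i_0<N+2; ++i_0) {
--                 A[i_0][i_1] = (int)rand();
--             }
--         }
--
--     todo check examples
--
--     :param name: Array name
--     :param dtype: Array data type
--     :param sizes: List of dimensions sizes (as strings)
--     :param dim: Index of currently processed dimension
--     :return: C code (as string)
--     """
--     size = sizes[dim]
--
--     indices = ['i_' + str(n) for n in range(dim + 1)]
--     indices_in_brackets = ['[' + i + ']' for i in indices]
--     i = indices[-1]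
--
--     inds = ''.join(indices_in_brackets[:-1])
--     ptr_asterisks = '*'*(len(sizes) - dim - 1)
--     res = '\t' * dim
--     res += '%s%s = malloc((%s+2) * sizeof(%s%s));\n' % \
--            (name, inds, size, dtype, ptr_asterisks)
--
--     res += '\t' * dim
--     res += 'for(int %s=0; %s<%s+2; ++%s) {\n' % \
--            (i, i, size, i)
--
--     if dim < len(sizes) - 1:
--         res += malloc(name, dtype, sizes, dim + 1)
--     else:
--         inds = ''.join(indices_in_brackets)
--         res += '\t' * (dim + 1)
--         res += '%s%s = (%s)rand();\n' % (name, inds, dtype)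
--
--     res += '\t' * dim
--     res += '}\n'
--
--     return res
-- ===== SOURCE B (Python) =====
-- # B: iterative (loop over dimensions + closing braces in reverse) instead of A's recursion.
-- def malloc(name, dtype, sizes, dim):
--     n = len(sizes)
--     idx = ['i_%d' % k for k in range(n)]
--     out = ''
--     for d in range(dim, n):
--         tabs = '\t' * d
--         lhs = name + ''.join('[%s]' % idx[k] for k in range(d))
--         stars = '*' * (n - d - 1)
--         out += '%s%s = malloc((%s+2) * sizeof(%s%s));\n' % (tabs, lhs, sizes[d], dtype, stars)
--         out += '%sfor(int %s=0; %s<%s+2; ++%s) {\n' % (tabs, idx[d], idx[d], sizes[d], idx[d])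
--     out += '\t' * n + '%s%s = (%s)rand();\n' % (name, ''.join('[%s]' % i for i in idx), dtype)
--     for d in reversed(range(dim, n)):
--         out += '\t' * d + '}\n'
--     return out
-- ===== Notes on version B (the rewrite author's own statement) =====
-- stated objective: alternative
-- what changed: Replaces A's per-dimension recursion (which concatenates the whole recursive suffix into each enclosing level's result) by a single iterative pass: one forward loop emitting each level's malloc line and for-header into one accumulator, the innermost init line, then a reverse loop emitting the closing braces.
import Mathlib
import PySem

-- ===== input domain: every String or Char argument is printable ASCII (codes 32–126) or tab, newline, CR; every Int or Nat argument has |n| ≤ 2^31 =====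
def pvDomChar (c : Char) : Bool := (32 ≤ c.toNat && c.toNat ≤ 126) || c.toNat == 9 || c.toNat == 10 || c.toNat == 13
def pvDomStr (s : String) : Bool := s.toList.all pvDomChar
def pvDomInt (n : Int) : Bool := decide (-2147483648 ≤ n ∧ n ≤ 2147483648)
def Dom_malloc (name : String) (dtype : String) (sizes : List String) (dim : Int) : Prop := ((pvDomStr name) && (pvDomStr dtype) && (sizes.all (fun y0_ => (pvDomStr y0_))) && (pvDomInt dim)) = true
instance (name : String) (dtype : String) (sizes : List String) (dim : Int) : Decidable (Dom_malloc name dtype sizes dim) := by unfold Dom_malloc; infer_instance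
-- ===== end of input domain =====

-- ===== PORT A =====
-- B replaces A's per-dimension recursion by a single forward loop plus a reverse loop of closing braces into one accumulator (objective: alternative decomposition).
-- '\t' * d / '*' * d (Python string repetition: empty for d <= 0)
def pyRep (c : Char) (d : Int) : String := String.ofList (List.replicate d.toNat c)

def malloc (name : String) (dtype : String) (sizes : List String) (dim : Int) : String :=
  match PySem.List.pyGet? sizes dim with
  | none => ""      -- Python: IndexError (excluded by Pre_malloc)
  | some size =>
    let indices : List String := (PySem.List.pyRange 0 (dim + 1) 1).map (fun n => "i_" ++ PySem.Int.toStr n)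
    let indices_in_brackets : List String := indices.map (fun i => "[" ++ i ++ "]")
    match PySem.List.pyGet? indices (-1) with
    | none => ""    -- Python: IndexError (excluded by Pre_malloc)
    | some i =>
      let inds : String := String.join (PySem.List.slice indices_in_brackets none (some (-1)))
      let ptr_asterisks : String := pyRep '*' ((sizes.length : Int) - dim - 1)
      let res : String := pyRep '\t' dim
      let res := res ++ name ++ inds ++ " = malloc((" ++ size ++ "+2) * sizeof(" ++ dtype ++ ptr_asterisks ++ "));\n"
      let res := res ++ pyRep '\t' dim
      let res := res ++ "for(int " ++ i ++ "=0; " ++ i ++ "<" ++ size ++ "+2; ++" ++ i ++ ") {\n"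
      let res := if dim < (sizes.length : Int) - 1 then
          res ++ malloc name dtype sizes (dim + 1)
        else
          res ++ pyRep '\t' (dim + 1) ++ name ++ String.join indices_in_brackets ++ " = (" ++ dtype ++ ")rand();\n"
      res ++ pyRep '\t' dim ++ "}\n"
termination_by ((sizes.length : Int) - dim).toNat
decreasing_by omega

-- ===== PORT B =====
def malloc_alt (name : String) (dtype : String) (sizes : List String) (dim : Int) : String :=
  let n : Int := (sizes.length : Int)
  let idx : List String := (PySem.List.pyRange 0 n 1).map (fun k => "i_" ++ PySem.Int.toStr k)
  let out := (PySem.List.pyRange dim n 1).foldl (fun out d =>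
      let tabs := pyRep '\t' d
      let lhs := name ++ String.join ((PySem.List.pyRange 0 d 1).map (fun k => "[" ++ PySem.List.pyGetD idx k "" ++ "]"))
      let stars := pyRep '*' (n - d - 1)
      let size := PySem.List.pyGetD sizes d ""
      let i := PySem.List.pyGetD idx d ""
      let out := out ++ tabs ++ lhs ++ " = malloc((" ++ size ++ "+2) * sizeof(" ++ dtype ++ stars ++ "));\n"
      out ++ tabs ++ "for(int " ++ i ++ "=0; " ++ i ++ "<" ++ size ++ "+2; ++" ++ i ++ ") {\n") ""
  let out := out ++ pyRep '\t' n ++ name ++ String.join (idx.map (fun i => "[" ++ i ++ "]")) ++ " = (" ++ dtype ++ ")rand();\n"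
  (PySem.List.pyRange dim n 1).reverse.foldl (fun out d => out ++ pyRep '\t' d ++ "}\n") out

-- ===== PRECONDITION & SPEC =====
-- Pre_malloc: exactly the inputs where A returns; outside it A raises IndexError (sizes[dim] or indices[-1]).
def Pre_malloc (name : String) (dtype : String) (sizes : List String) (dim : Int) : Prop :=
  0 <= dim ∧ dim < (sizes.length : Int)
instance (name : String) (dtype : String) (sizes : List String) (dim : Int) : Decidable (Pre_malloc name dtype sizes dim) := by unfold Pre_malloc; infer_instance
def pvWitness_malloc : String × String × List String × Int := ("A", "int", ["M", "N+42"], 0)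

def Spec_malloc (name : String) (dtype : String) (sizes : List String) (dim : Int) (out : String) : Prop := out = malloc_alt name dtype sizes dim
instance (name : String) (dtype : String) (sizes : List String) (dim : Int) (out : String) : Decidable (Spec_malloc name dtype sizes dim out) := by unfold Spec_malloc; infer_instance

-- ===== CLAIM (what is proved, stated in full; the proofs are below) =====
def Claim_equal_malloc : Prop := ∀ (name : String) (dtype : String) (sizes : List String) (dim : Int), Dom_malloc name dtype sizes dim → Pre_malloc name dtype sizes dim → Spec_malloc name dtype sizes dim (malloc name dtype sizes dim)

-- ===== LEMMAS AND PROOFS =====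

-- canonical pieces (Nat-indexed) both ports are reduced to
def iN (d : Nat) : String := "i_" ++ PySem.Int.toStr (d : Int)
def brk (d : Nat) : String := "[" ++ iN d ++ "]"
def braN (d : Nat) : String := String.join ((List.range d).map brk)
def tabsN (d : Nat) : String := String.ofList (List.replicate d '\t')
def lineM (name dtype : String) (sizes : List String) (d : Nat) : String :=
  tabsN d ++ name ++ braN d ++ " = malloc((" ++ sizes.getD d "" ++ "+2) * sizeof(" ++ dtype
    ++ String.ofList (List.replicate (sizes.length - d - 1) '*') ++ "));\n"
def lineF (sizes : List String) (d : Nat) : String :=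
  tabsN d ++ "for(int " ++ iN d ++ "=0; " ++ iN d ++ "<" ++ sizes.getD d "" ++ "+2; ++" ++ iN d ++ ") {\n"
def lineI (name dtype : String) (sizes : List String) : String :=
  tabsN sizes.length ++ name ++ braN sizes.length ++ " = (" ++ dtype ++ ")rand();\n"
def lineC (d : Nat) : String := tabsN d ++ "}\n"

def canon (name dtype : String) (sizes : List String) (d : Nat) : String :=
  if d + 1 < sizes.length then
    lineM name dtype sizes d ++ lineF sizes d ++ canon name dtype sizes (d + 1) ++ lineC d
  else
    lineM name dtype sizes d ++ lineF sizes d ++ lineI name dtype sizes ++ lineC d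
termination_by sizes.length - d
decreasing_by omega

lemma brk_norm : brk = fun x : Nat => "[" ++ ("i_" ++ (PySem.Int.toStr (x : Int) ++ "]")) := by
  funext x; simp [brk, iN, String.append_assoc]

lemma A_canon (name dtype : String) (sizes : List String) :
    ∀ d : Nat, d < sizes.length → malloc name dtype sizes (d : Int) = canon name dtype sizes d := by
  have main : ∀ k d, sizes.length - d = k → d < sizes.length → malloc name dtype sizes (d : Int) = canon name dtype sizes d := by
    intro k
    induction k with
    | zero => omega
    | succ k ih =>
      intro d hk hd
      rw [malloc, canon]
      rw [PySem.List.pyGet?_natCast, List.getElem?_eq_getElem hd]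
      have hr : PySem.List.pyRange 0 ((d : Int) + 1) 1 = PySem.List.pyRange 0 (d : Int) 1 ++ [(d : Int)] := by
        exact PySem.List.pyRange_one_succ_right (by omega)
      rw [hr]
      simp only [List.map_append, List.map_cons, List.map_nil]
      rw [PySem.List.pyGet?_neg_one_append_singleton]
      rw [PySem.List.slice_to_neg_one]
      simp only [List.dropLast_concat]
      have hst : (((sizes.length : Int)) - d - 1).toNat = sizes.length - d - 1 := by omega
      have hgd : sizes[d]? = some sizes[d] := List.getElem?_eq_getElem hd
      rw [PySem.List.pyRange_zero_nat]
      by_cases hc : d + 1 < sizes.length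
      · rw [if_pos (by omega : (d : Int) < (sizes.length : Int) - 1), if_pos hc]
        have hcast : ((d : Int) + 1) = (((d + 1 : Nat)) : Int) := by push_cast; ring
        rw [hcast, ih (d + 1) (by omega) hc]
        simp [lineM, lineF, lineC, braN, iN, tabsN, pyRep, hst, hgd, brk_norm, String.append_assoc, List.map_map, Function.comp_def]
      · rw [if_neg (by omega : ¬ ((d : Int) < (sizes.length : Int) - 1)), if_neg hc]
        have hdl : d + 1 = sizes.length := by omega
        have hcast : ((d : Int) + 1) = (((d + 1 : Nat)) : Int) := by push_cast; ring
        rw [hcast]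
        simp [lineM, lineF, lineC, lineI, braN, iN, tabsN, pyRep, brk_norm, ← hdl, List.range_succ, String.append_assoc, List.map_map, Function.comp_def]
  exact fun d hd => main _ d rfl hd

-- B-side proof helpers
def idxL (sizes : List String) : List String :=
  (PySem.List.pyRange 0 ((sizes.length : Int)) 1).map (fun k => "i_" ++ PySem.Int.toStr k)

def bX (name dtype : String) (sizes : List String) (d : Int) : String :=
  pyRep '\t' d ++ name
    ++ String.join ((PySem.List.pyRange 0 d 1).map (fun k => "[" ++ PySem.List.pyGetD (idxL sizes) k "" ++ "]"))
    ++ " = malloc((" ++ PySem.List.pyGetD sizes d "" ++ "+2) * sizeof(" ++ dtype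
    ++ pyRep '*' ((sizes.length : Int) - d - 1) ++ "));\n"
    ++ pyRep '\t' d ++ "for(int " ++ PySem.List.pyGetD (idxL sizes) d "" ++ "=0; "
    ++ PySem.List.pyGetD (idxL sizes) d "" ++ "<" ++ PySem.List.pyGetD sizes d "" ++ "+2; ++"
    ++ PySem.List.pyGetD (idxL sizes) d "" ++ ") {\n"

def bC (d : Int) : String := pyRep '\t' d ++ "}\n"

def bI (name dtype : String) (sizes : List String) : String :=
  pyRep '\t' ((sizes.length : Int)) ++ name
    ++ String.join ((idxL sizes).map (fun i => "[" ++ i ++ "]")) ++ " = (" ++ dtype ++ ")rand();\n"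

lemma str_foldl_acc : ∀ (l : List String) (s t : String),
    l.foldl (fun r x => r ++ x) (s ++ t) = s ++ l.foldl (fun r x => r ++ x) t := by
  intro l
  induction l with
  | nil => intro s t; simp [List.foldl_nil]
  | cons x xs ih =>
    intro s t
    simp only [List.foldl_cons, String.append_assoc]
    exact ih s (t ++ x)

lemma str_join_append (a b : List String) : String.join (a ++ b) = String.join a ++ String.join b := by
  show (a ++ b).foldl _ _ = _
  rw [List.foldl_append]
  have := str_foldl_acc b (a.foldl (fun r x => r ++ x) "") ""
  simp only [String.append_empty] at this
  exact this

lemma str_join_cons (c : String) (l : List String) : String.join (c :: l) = c ++ String.join l := by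
  have := str_join_append [c] l
  simpa [String.join] using this

lemma str_foldl_join (X : Int → String) :
    ∀ (l : List Int) (s : String), l.foldl (fun a d => a ++ X d) s = s ++ String.join (l.map X) := by
  intro l
  induction l with
  | nil => intro s; simp [List.foldl_nil, String.join]
  | cons x t ih =>
    intro s
    simp only [List.foldl_cons, List.map_cons]
    rw [ih (s ++ X x), str_join_cons, String.append_assoc]

lemma str_foldr_acc (C : Int → String) :
    ∀ (l : List Int) (s : String), List.foldr (fun x y => y ++ C x) s l = s ++ String.join ((l.map C).reverse) := by
  intro l
  induction l with
  | nil => intro s; simp [String.join]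
  | cons x t ih =>
    intro s
    simp only [List.foldr_cons, List.map_cons, List.reverse_cons]
    rw [ih s, str_join_append]
    simp [String.join, String.append_assoc]

lemma alt_split (name dtype : String) (sizes : List String) (dim : Int) :
    malloc_alt name dtype sizes dim =
      String.join ((PySem.List.pyRange dim ((sizes.length : Int)) 1).map (fun d => bX name dtype sizes d))
        ++ bI name dtype sizes
        ++ String.join ((PySem.List.pyRange dim ((sizes.length : Int)) 1).reverse.map (fun d => bC d)) := by
  unfold malloc_alt
  simp only [String.append_assoc]
  simp [str_foldl_join, str_foldr_acc, bX, bC, bI, idxL, String.append_assoc]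

lemma bX_eq (name dtype : String) (sizes : List String) (d : Nat) (hd : d < sizes.length) :
    bX name dtype sizes (d : Int) = lineM name dtype sizes d ++ lineF sizes d := by
  have hidx : PySem.List.pyGetD (idxL sizes) (d : Int) "" = iN d := by
    unfold idxL iN
    exact PySem.List.pyGetD_map_pyRange _ sizes.length d "" hd
  have hjoin : (PySem.List.pyRange 0 (d : Int) 1).map (fun k => "[" ++ (PySem.List.pyGetD (idxL sizes) k "" ++ "]"))
      = (List.range d).map (fun x : Nat => "[" ++ ("i_" ++ (PySem.Int.toStr (x : Int) ++ "]"))) := by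
    rw [PySem.List.pyRange_zero_nat, List.map_map]
    apply List.map_congr_left
    intro k hk
    have hk' : k < d := List.mem_range.mp hk
    simp only [Function.comp_apply]
    rw [show PySem.List.pyGetD (idxL sizes) ((k : Nat) : Int) "" = iN k from by
      unfold idxL iN; exact PySem.List.pyGetD_map_pyRange _ sizes.length k "" (by omega)]
    simp [iN, String.append_assoc]
  have hst : (((sizes.length : Int)) - d - 1).toNat = sizes.length - d - 1 := by omega
  simp [bX, lineM, lineF, braN, brk_norm, iN, tabsN, pyRep, hidx, hjoin, hst, String.append_assoc]

lemma bC_eq (d : Nat) : bC (d : Int) = lineC d := by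
  simp [bC, lineC, tabsN, pyRep]

lemma bI_eq (name dtype : String) (sizes : List String) :
    bI name dtype sizes = lineI name dtype sizes := by
  unfold bI lineI idxL braN
  rw [PySem.List.pyRange_zero_nat, List.map_map, List.map_map]
  simp [brk_norm, Function.comp_def, tabsN, pyRep, String.append_assoc]

lemma B_canon (name dtype : String) (sizes : List String) :
    ∀ d : Nat, d < sizes.length → malloc_alt name dtype sizes (d : Int) = canon name dtype sizes d := by
  have main : ∀ k d, sizes.length - d = k → d < sizes.length → malloc_alt name dtype sizes (d : Int) = canon name dtype sizes d := by
    intro k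
    induction k with
    | zero => omega
    | succ k ih =>
      intro d hk hd
      rw [alt_split, canon]
      have hcons : PySem.List.pyRange (d : Int) ((sizes.length : Int)) 1
          = (d : Int) :: PySem.List.pyRange ((d : Int) + 1) ((sizes.length : Int)) 1 :=
        PySem.List.pyRange_one_cons (by exact_mod_cast hd)
      have hcast : ((d : Int) + 1) = (((d + 1 : Nat)) : Int) := by push_cast; ring
      rw [hcons, hcast]
      by_cases hc : d + 1 < sizes.length
      · rw [if_pos hc]
        have h2 : canon name dtype sizes (d + 1)
            = String.join ((PySem.List.pyRange (((d + 1 : Nat)) : Int) ((sizes.length : Int)) 1).map (fun x => bX name dtype sizes x))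
              ++ bI name dtype sizes
              ++ String.join ((PySem.List.pyRange (((d + 1 : Nat)) : Int) ((sizes.length : Int)) 1).reverse.map (fun x => bC x)) :=
          (ih (d + 1) (by omega) hc).symm.trans (alt_split name dtype sizes _)
        rw [h2]
        simp only [List.map_cons, List.reverse_cons, List.map_append, List.map_nil,
          str_join_cons, str_join_append, bX_eq name dtype sizes d hd, bC_eq]
        simp [show String.join ([] : List String) = "" from rfl, String.append_assoc]
      · rw [if_neg hc]
        have hnil : PySem.List.pyRange (((d + 1 : Nat)) : Int) ((sizes.length : Int)) 1 = [] :=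
          PySem.List.pyRange_one_eq_nil (by omega)
        rw [hnil]
        simp [bX_eq name dtype sizes d hd, bC_eq, bI_eq, String.append_assoc, String.join]
  exact fun d hd => main _ d rfl hd

-- ===== VERDICT (by name: the statement is the Claim_ definition above) =====
theorem malloc_spec : Claim_equal_malloc := by
  intro name dtype sizes dim _ hpre
  obtain ⟨h0, h1⟩ := hpre
  unfold Spec_malloc
  obtain ⟨d, rfl⟩ : ∃ d : Nat, (d : Int) = dim := ⟨dim.toNat, by omega⟩
  rw [A_canon name dtype sizes d (by exact_mod_cast h1), B_canon name dtype sizes d (by exact_mod_cast h1)]
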